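-- pv_equiv track=rewrite | github.com/mhmd-zbib/ai-agent | app/shared/logging.py | _shorten_name
-- ===== SOURCE A (Python) =====
-- _KNOWN_NAMES: dict[str, str] = {
--     "uvicorn.access": "http",
--     "uvicorn.error": "uvicorn",
--     "uvicorn": "uvicorn",
--     "httpx": "httpx",
-- }
--
-- _SKIP_SEGMENTS = frozenset(
--     {
--         "app",
--         "modules",
--         "services",
--         "repositories",
--         "infrastructure",
--         "shared",
--     }
-- )
--
-- def _shorten_name(name: str) -> str:
--     if name in _KNOWN_NAMES:
--         return _KNOWN_NAMES[name]
--     parts = name.split(".")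
--     meaningful = [p for p in parts if p not in _SKIP_SEGMENTS]
--     if not meaningful:
--         return name
--     return ".".join(meaningful[-2:]) if len(meaningful) >= 2 else meaningful[0]
-- ===== SOURCE B (Python) =====
-- _KNOWN_NAMES: dict[str, str] = {
--     "uvicorn.access": "http",
--     "uvicorn.error": "uvicorn",
--     "uvicorn": "uvicorn",
--     "httpx": "httpx",
-- }
--
-- _SKIP_SEGMENTS = frozenset(
--     {
--         "app",
--         "modules",
--         "services",
--         "repositories",
--         "infrastructure",
--         "shared",
--     }
-- )
--
-- def _shorten_name(name: str) -> str:
--     if name in _KNOWN_NAMES: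
--         return _KNOWN_NAMES[name]
--     buf = []
--     for p in reversed(name.split(".")):
--         if p in _SKIP_SEGMENTS:
--             continue
--         buf.append(p)
--         if len(buf) == 2:
--             break
--     if not buf:
--         return name
--     buf.reverse()
--     return ".".join(buf)
-- ===== Notes on version B (the rewrite author's own statement) =====
-- stated objective: alternative
-- what changed: Replaces the build-full-filtered-list-then-slice[-2:] with a single reverse scan over the segments that skips known segments and collects at most two meaningful ones with an early break, reversing the small buffer back before joining.
import Mathlib
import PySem

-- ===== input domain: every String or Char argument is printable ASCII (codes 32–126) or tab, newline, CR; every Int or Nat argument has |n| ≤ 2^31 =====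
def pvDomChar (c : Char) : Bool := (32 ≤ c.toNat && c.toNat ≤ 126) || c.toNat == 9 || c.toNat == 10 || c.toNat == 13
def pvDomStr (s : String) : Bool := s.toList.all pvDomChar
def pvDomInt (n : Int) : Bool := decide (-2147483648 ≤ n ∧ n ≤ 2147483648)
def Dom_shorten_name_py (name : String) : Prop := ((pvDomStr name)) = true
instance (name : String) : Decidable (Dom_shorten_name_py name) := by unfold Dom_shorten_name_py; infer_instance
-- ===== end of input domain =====

-- B replaces A's filter-then-slice with a reverse, early-terminating scan that collects at most
-- two meaningful segments and stops; objective: alternative (same cost, different traversal).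

-- ===== PORT A =====
def pvKnownNames : PySem.Dict String String :=
  PySem.Dict.ofList [("uvicorn.access", "http"), ("uvicorn.error", "uvicorn"),
                     ("uvicorn", "uvicorn"), ("httpx", "httpx")]

def pvSkipSegments : PySem.Set String :=
  PySem.Set.ofList ["app", "modules", "services", "repositories", "infrastructure", "shared"]

def shorten_name_py (name : String) : String :=
  if pvKnownNames.contains name then (pvKnownNames.get? name).getD ""
  else
    let parts := (PySem.Str.split? name ".").getD []   -- "." ≠ "" so split? is always some
    let meaningful := parts.filter (fun p => !(PySem.Set.contains pvSkipSegments p))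
    if meaningful = [] then name
    else if 2 ≤ meaningful.length then
      PySem.Str.join "." (PySem.List.slice meaningful (some (-2)) none)
    else PySem.List.pyGetD meaningful 0 ""

-- ===== PORT B =====
-- reverse scan: append meaningful segments to buf, break as soon as buf holds two
def pvCollect : List String → List String → List String
  | [], buf => buf
  | p :: rest, buf =>
    if PySem.Set.contains pvSkipSegments p then pvCollect rest buf
    else
      let buf' := buf ++ [p]
      if buf'.length = 2 then buf' else pvCollect rest buf'

def shorten_name_py_alt (name : String) : String :=
  if pvKnownNames.contains name then (pvKnownNames.get? name).getD ""
  else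
    let buf := pvCollect ((PySem.Str.split? name ".").getD []).reverse []
    if buf = [] then name
    else PySem.Str.join "." buf.reverse

-- ===== PRECONDITION & SPEC =====
def Spec_shorten_name_py (name : String) (out : String) : Prop := out = shorten_name_py_alt name
instance (name : String) (out : String) : Decidable (Spec_shorten_name_py name out) := by unfold Spec_shorten_name_py; infer_instance

-- ===== CLAIM (what is proved, stated in full; the proofs are below) =====
def Claim_equal_shorten_name_py : Prop := ∀ (name : String), Dom_shorten_name_py name → Spec_shorten_name_py name (shorten_name_py name)

-- ===== LEMMAS AND PROOFS =====

-- the collector returns the first two elements of buf ++ (meaningful part of l)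
theorem pvCollect_spec (l : List String) (buf : List String) (h : buf.length < 2) :
    pvCollect l buf = (buf ++ l.filter (fun p => !(PySem.Set.contains pvSkipSegments p))).take 2 := by
  induction l generalizing buf with
  | nil =>
    simp only [pvCollect, List.filter_nil, List.append_nil]
    rw [List.take_of_length_le (by omega)]
  | cons p rest ih =>
    simp only [pvCollect, List.filter_cons]
    by_cases hp : PySem.Set.contains pvSkipSegments p = true
    · rw [if_pos hp, ih buf h]
      simp at hp
      simp [hp]
    · rw [if_neg hp]
      simp at hp
      have hp' : (!(PySem.Set.contains pvSkipSegments p)) = true := by simp [hp]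
      rw [hp']
      by_cases h2 : (buf ++ [p]).length = 2
      · rw [if_pos h2]
        simp only [List.length_append, List.length_cons, List.length_nil] at h2
        obtain ⟨b, rfl⟩ := List.length_eq_one_iff.mp (by omega : buf.length = 1)
        simp
      · rw [if_neg h2, ih (buf ++ [p])
            (by simp only [List.length_append, List.length_cons, List.length_nil] at h2 ⊢; omega)]
        simp

theorem shorten_name_py_spec : Claim_equal_shorten_name_py := by
  unfold Claim_equal_shorten_name_py Spec_shorten_name_py
  intro name _
  unfold shorten_name_py shorten_name_py_alt
  by_cases hk : pvKnownNames.contains name = true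
  · simp only [hk, if_true]
  · simp only [hk, Bool.false_eq_true, if_false]
    rw [pvCollect_spec _ [] (by simp), List.filter_reverse]
    simp only [List.nil_append]
    set parts := (PySem.Str.split? name ".").getD [] with hparts
    set m := parts.filter (fun p => !(PySem.Set.contains pvSkipSegments p)) with hm
    match m with
    | [] => simp
    | [x] => simp [PySem.Str.join, PySem.Chars.join_singleton, PySem.List.pyGetD_zero_cons]
    | x :: y :: rest =>
      have hne : ((x :: y :: rest).reverse.take 2) ≠ [] := by
        simp [List.take_eq_nil_iff]
      rw [if_neg (by simp), if_pos (by simp), if_neg hne]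
      rw [PySem.List.slice_from_neg_ofNat _ 2 (by omega)]
      rw [List.take_reverse, List.reverse_reverse]
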